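-- pv_equiv track=rewrite | github.com/Any-Winter-4079/RAG-Email-Autoresponder | helpers/retrieval_pipeline.py | cap_query_type_to_rewritten_queries
-- ===== SOURCE A (Python) =====
-- def cap_query_type_to_rewritten_queries(query_type_to_rewritten_queries, n_max_queries):
--     n_queries = sum(len(queries) for queries in query_type_to_rewritten_queries.values())
--     if n_queries <= n_max_queries:
--         return query_type_to_rewritten_queries, 0
--
--     n_capped_queries_removed = n_queries - n_max_queries
--     for _ in range(n_capped_queries_removed):
--         longest_query_type = max(
--             query_type_to_rewritten_queries,
--             key=lambda query_type: len(query_type_to_rewritten_queries[query_type]),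
--         )
--         # note this mutates the dictionary
--         query_type_to_rewritten_queries[longest_query_type].pop()
--     return query_type_to_rewritten_queries, n_capped_queries_removed
-- ===== SOURCE B (Python) =====
-- def cap_query_type_to_rewritten_queries(query_type_to_rewritten_queries, n_max_queries):
--     lens = [len(v) for v in query_type_to_rewritten_queries.values()]
--     total = sum(lens)
--     if total <= n_max_queries:
--         return query_type_to_rewritten_queries, 0
--     # Largest threshold t with sum(min(l, t)) <= n_max_queries, by binary search.
--     # Capping each list at t (and letting the last r over-threshold lists keep
--     # t+1 items) reproduces the repeated pop-from-the-longest process in one pass.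
--     def g(t):
--         return sum(min(l, t) for l in lens)
--     lo, hi = 0, max(lens)  # g(lo) = 0 <= n_max_queries < total = g(hi)
--     while hi - lo > 1:
--         mid = (lo + hi) // 2
--         if g(mid) <= n_max_queries:
--             lo = mid
--         else:
--             hi = mid
--     t = lo
--     r = n_max_queries - g(t)            # lists left holding t+1 queries
--     c = sum(1 for l in lens if l > t)   # lists longer than the threshold
--     out = {}
--     seen = 0
--     for k, v in query_type_to_rewritten_queries.items():
--         if len(v) > t:
--             seen += 1
--             out[k] = v[: t + 1 if seen > c - r else t]
--         else:
--             out[k] = v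
--     return out, total - n_max_queries
-- ===== Notes on version B (the rewrite author's own statement) =====
-- stated objective: faster
-- what changed: A repeatedly rescans the whole dict to find and pop the longest list, once per removed query; B computes the final threshold length t by binary search on the capped total and trims every list once in a single pass (the last r over-threshold lists keep t+1 items).
import Mathlib
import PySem

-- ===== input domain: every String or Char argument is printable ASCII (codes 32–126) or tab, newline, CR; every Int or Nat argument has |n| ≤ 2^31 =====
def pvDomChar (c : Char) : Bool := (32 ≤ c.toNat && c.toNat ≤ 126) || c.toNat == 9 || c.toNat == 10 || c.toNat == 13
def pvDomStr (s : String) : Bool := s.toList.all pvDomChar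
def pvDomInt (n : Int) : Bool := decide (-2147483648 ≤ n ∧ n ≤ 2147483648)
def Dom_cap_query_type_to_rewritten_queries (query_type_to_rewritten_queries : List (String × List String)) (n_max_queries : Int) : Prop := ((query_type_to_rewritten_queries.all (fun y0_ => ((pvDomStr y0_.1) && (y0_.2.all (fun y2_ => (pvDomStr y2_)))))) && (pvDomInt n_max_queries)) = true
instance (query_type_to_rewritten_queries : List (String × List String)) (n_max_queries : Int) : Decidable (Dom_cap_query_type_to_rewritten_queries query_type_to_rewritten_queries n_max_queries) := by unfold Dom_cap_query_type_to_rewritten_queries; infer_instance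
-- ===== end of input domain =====

-- B replaces A's repeated scan-for-the-longest-list loop (one full pass per removed query) by a
-- closed-form cap: a binary search finds the threshold length t, and one pass trims each list once.
-- A mutates its dict argument in place; the equivalence proved here is about the RETURN value only.


-- ===== PORT A =====
-- one iteration of A's loop: pick the first key with the longest list, pop its last query
def capA_step (d : PySem.Dict String (List String)) : PySem.Dict String (List String) :=
  match PySem.List.max? d.keys (fun query_type => PySem.List.len (d.getD query_type [])) with
  | some longest => d.modify longest [] (fun v => v.dropLast)  -- .pop(): IndexError on an empty list (excluded by Pre_) else drops the last element
  | none => d  -- max() on an empty dict raises ValueError (excluded by Pre_)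

def cap_query_type_to_rewritten_queries (query_type_to_rewritten_queries : List (String × List String)) (n_max_queries : Int) : (List (String × List String)) × Int :=
  let d0 : PySem.Dict String (List String) := PySem.Dict.mk query_type_to_rewritten_queries
  let n_queries : Int := (d0.values.map PySem.List.len).sum
  if n_queries ≤ n_max_queries then (query_type_to_rewritten_queries, 0)
  else
    let n_capped_queries_removed := n_queries - n_max_queries
    let final := (PySem.List.pyRange 0 n_capped_queries_removed 1).foldl (fun d _ => capA_step d) d0
    (final.items, n_capped_queries_removed)

-- ===== PORT B =====
-- Source B's binary search: largest t in [lo, hi] with g t ≤ n, given g lo ≤ n < g hi.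
-- (fuel = hi - lo bounds the iteration count so the recursion is structural; it never runs out)
def capAltSearch (g : Int → Int) (n : Int) : Nat → Int → Int → Int
  | 0, lo, _ => lo
  | fuel + 1, lo, hi =>
    if 1 < hi - lo then
      let mid := PySem.Int.floordiv (lo + hi) 2
      if g mid ≤ n then capAltSearch g n fuel mid hi else capAltSearch g n fuel lo mid
    else lo

def cap_query_type_to_rewritten_queries_alt (query_type_to_rewritten_queries : List (String × List String)) (n_max_queries : Int) : (List (String × List String)) × Int :=
  let d : PySem.Dict String (List String) := PySem.Dict.mk query_type_to_rewritten_queries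
  let lens : List Int := d.values.map PySem.List.len
  let total := lens.sum
  if total ≤ n_max_queries then (query_type_to_rewritten_queries, 0)
  else
    let g : Int → Int := fun t => (lens.map (fun l => min l t)).sum
    let maxlen : Int := match PySem.List.max? lens (fun x => x) with
      | some m => m
      | none => 0  -- max() on an empty list raises ValueError; here total > n_max_queries ≥ 0 (Pre_) forces lens ≠ []
    let t := capAltSearch g n_max_queries (maxlen - 0).toNat 0 maxlen
    let r := n_max_queries - g t
    let c := (lens.map (fun l => if t < l then (1 : Int) else 0)).sum
    let out := (d.items.foldl
      (fun (acc : PySem.Dict String (List String) × Int) kv =>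
        if t < PySem.List.len kv.2 then
          let seen := acc.2 + 1
          (acc.1.insert kv.1 (PySem.List.slice kv.2 none (some (if c - r < seen then t + 1 else t))), seen)
        else (acc.1.insert kv.1 kv.2, acc.2))
      (PySem.Dict.mk [], 0)).1
    (out.items, total - n_max_queries)

-- ===== PRECONDITION & SPEC =====
-- Pre_ excludes (a) negative n_max_queries, on which A always raises (IndexError popping an emptied
-- list, or ValueError from max() on an empty dict), and (b) duplicate keys, which a Python dict
-- cannot hold (the dict built from such a list collapses them before A runs).
def Pre_cap_query_type_to_rewritten_queries (query_type_to_rewritten_queries : List (String × List String)) (n_max_queries : Int) : Prop :=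
  0 ≤ n_max_queries ∧ (query_type_to_rewritten_queries.map Prod.fst).Nodup
instance (query_type_to_rewritten_queries : List (String × List String)) (n_max_queries : Int) : Decidable (Pre_cap_query_type_to_rewritten_queries query_type_to_rewritten_queries n_max_queries) := by unfold Pre_cap_query_type_to_rewritten_queries; infer_instance

def pvWitness_cap_query_type_to_rewritten_queries : (List (String × List String)) × Int :=
  ([("greeting", ["hi", "hello", "hey"]), ("farewell", ["bye"])], 2)

def Spec_cap_query_type_to_rewritten_queries (query_type_to_rewritten_queries : List (String × List String)) (n_max_queries : Int) (out : (List (String × List String)) × Int) : Prop := out = cap_query_type_to_rewritten_queries_alt query_type_to_rewritten_queries n_max_queries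
instance (query_type_to_rewritten_queries : List (String × List String)) (n_max_queries : Int) (out : (List (String × List String)) × Int) : Decidable (Spec_cap_query_type_to_rewritten_queries query_type_to_rewritten_queries n_max_queries out) := by unfold Spec_cap_query_type_to_rewritten_queries; infer_instance

-- ===== CLAIM (what is proved, stated in full; the proofs are below) =====
def Claim_equal_cap_query_type_to_rewritten_queries : Prop := ∀ (query_type_to_rewritten_queries : List (String × List String)) (n_max_queries : Int), Dom_cap_query_type_to_rewritten_queries query_type_to_rewritten_queries n_max_queries → Pre_cap_query_type_to_rewritten_queries query_type_to_rewritten_queries n_max_queries → Spec_cap_query_type_to_rewritten_queries query_type_to_rewritten_queries n_max_queries (cap_query_type_to_rewritten_queries query_type_to_rewritten_queries n_max_queries)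


-- ===== LEMMAS AND PROOFS =====

-- spec-level view of both programs: lengths, the threshold characterisation, and trimmed configurations

-- number of lists longer than t
def cntGt (t : Nat) (xs : List (String × List String)) : Nat :=
  xs.countP (fun e => decide (t < e.2.length))

-- total number of queries kept when every list is capped at t
def gN (t : Nat) (xs : List (String × List String)) : Nat :=
  (xs.map (fun e => min e.2.length t)).sum

def totN (xs : List (String × List String)) : Nat := (xs.map (fun e => e.2.length)).sum

-- cap every list at t, but let the LAST r lists longer than t keep t+1 elements
def trimR (t r : Nat) : List (String × List String) → List (String × List String)
  | [] => []
  | e :: xs =>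
    (e.1, if e.2.length ≤ t then e.2 else e.2.take (if cntGt t xs + 1 ≤ r then t + 1 else t))
      :: trimR t r xs

-- one A-step, positionally: pop the last element of the first list of length M
def stepL (M : Nat) : List (String × List String) → List (String × List String)
  | [] => []
  | e :: xs => if e.2.length = M then (e.1, e.2.dropLast) :: xs else e :: stepL M xs

lemma cntGt_cons (t : Nat) (e : String × List String) (xs : List (String × List String)) :
    cntGt t (e :: xs) = (if t < e.2.length then 1 else 0) + cntGt t xs := by
  simp only [cntGt, List.countP_cons]; split_ifs with h <;> simp at h ⊢ <;> omega

lemma cntGt_anti (t t' : Nat) (h : t ≤ t') (xs : List (String × List String)) :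
    cntGt t' xs ≤ cntGt t xs := by
  apply List.countP_mono_left; intro e _ he; simp at he ⊢; omega

lemma gN_zero (xs : List (String × List String)) : gN 0 xs = 0 := by
  simp [gN]

lemma gN_cons (t : Nat) (e : String × List String) (xs : List (String × List String)) :
    gN t (e :: xs) = min e.2.length t + gN t xs := by simp [gN]

lemma gN_succ (t : Nat) (xs : List (String × List String)) :
    gN (t + 1) xs = gN t xs + cntGt t xs := by
  induction xs with
  | nil => simp [gN, cntGt]
  | cons e xs ih => rw [gN_cons, gN_cons, cntGt_cons, ih]; split_ifs <;> omega

lemma gN_mono (xs : List (String × List String)) {a b : Nat} (h : a ≤ b) : gN a xs ≤ gN b xs := by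
  apply List.sum_le_sum; intro e _; exact min_le_min (le_refl _) h

lemma gN_total (t : Nat) (xs : List (String × List String)) (h : ∀ e ∈ xs, e.2.length ≤ t) :
    gN t xs = totN xs := by
  unfold gN totN; congr 1; apply List.map_congr_left; intro e he; exact Nat.min_eq_left (h e he)

lemma map_fst_trimR (t r : Nat) (xs : List (String × List String)) :
    (trimR t r xs).map Prod.fst = xs.map Prod.fst := by
  induction xs with
  | nil => rfl
  | cons e xs ih => simp [trimR, ih]

lemma trimR_len_le (t r : Nat) (xs : List (String × List String)) :
    ∀ e ∈ trimR t r xs, e.2.length ≤ t + 1 := by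
  induction xs with
  | nil => simp [trimR]
  | cons e xs ih =>
    intro y hy
    simp only [trimR, List.mem_cons] at hy
    rcases hy with h | h
    · subst h; split_ifs with h1 h2 <;> simp [List.length_take] <;> omega
    · exact ih y h

lemma trimR_len_le0 (t : Nat) (xs : List (String × List String)) :
    ∀ e ∈ trimR t 0 xs, e.2.length ≤ t := by
  induction xs with
  | nil => simp [trimR]
  | cons e xs ih =>
    intro y hy
    simp only [trimR, List.mem_cons] at hy
    rcases hy with h | h
    · subst h; split_ifs with h1 h2 <;> simp [List.length_take] <;> omega
    · exact ih y h

lemma trimR_exA (t r : Nat) (xs : List (String × List String)) (h1 : 1 ≤ r)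
    (h2 : r ≤ cntGt t xs) : ∃ e ∈ trimR t r xs, e.2.length = t + 1 := by
  induction xs with
  | nil => simp [cntGt] at h2; omega
  | cons e xs ih =>
    rw [cntGt_cons] at h2
    by_cases hc : r ≤ cntGt t xs
    · obtain ⟨y, hy, hl⟩ := ih hc
      refine ⟨y, ?_, hl⟩
      simp only [trimR]
      exact List.mem_cons_of_mem _ hy
    · have hcand : t < e.2.length := by by_contra hh; rw [if_neg hh] at h2; omega
      have hhd : trimR t r (e :: xs) = (e.1, e.2.take (t + 1)) :: trimR t r xs := by
        simp only [trimR, if_neg (by omega : ¬ e.2.length ≤ t),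
          if_pos (by omega : cntGt t xs + 1 ≤ r)]
      rw [hhd]
      exact ⟨(e.1, e.2.take (t + 1)), List.mem_cons_self .., by simp [List.length_take]; omega⟩

lemma trimR_exB (t : Nat) (xs : List (String × List String))
    (h : ∃ e ∈ xs, t ≤ e.2.length) : ∃ e ∈ trimR t 0 xs, e.2.length = t := by
  induction xs with
  | nil => simp at h
  | cons e xs ih =>
    rcases h with ⟨y, hy, hl⟩
    rcases List.mem_cons.mp hy with h | h
    · subst h
      by_cases h1 : y.2.length ≤ t
      · refine ⟨(y.1, y.2), ?_, by simp; omega⟩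
        simp only [trimR, if_pos h1]
        exact List.mem_cons_self ..
      · refine ⟨(y.1, y.2.take t), ?_, by simp [List.length_take]; omega⟩
        simp only [trimR, if_neg h1, if_neg (by omega : ¬ cntGt t xs + 1 ≤ 0)]
        exact List.mem_cons_self ..
    · obtain ⟨z, hz, hzl⟩ := ih ⟨y, h, hl⟩
      refine ⟨z, ?_, hzl⟩
      simp only [trimR]
      exact List.mem_cons_of_mem _ hz

lemma trimR_id (t : Nat) (xs : List (String × List String)) (h : ∀ e ∈ xs, e.2.length ≤ t) :
    trimR t 0 xs = xs := by
  induction xs with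
  | nil => rfl
  | cons e xs ih =>
    have he := h e (List.mem_cons_self ..)
    simp only [trimR, if_pos he]
    rw [ih (fun y hy => h y (List.mem_cons_of_mem _ hy))]

lemma trimR_congr_r (t r r' : Nat) (xs : List (String × List String)) (h : cntGt t xs ≤ r)
    (h' : cntGt t xs ≤ r') : trimR t r xs = trimR t r' xs := by
  induction xs with
  | nil => rfl
  | cons e xs ih =>
    rw [cntGt_cons] at h h'
    simp only [trimR]
    by_cases hL : t < e.2.length
    · rw [if_pos hL] at h h'
      rw [ih (by omega) (by omega)]
      simp only [if_neg (by omega : ¬ e.2.length ≤ t),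
        if_pos (by omega : cntGt t xs + 1 ≤ r), if_pos (by omega : cntGt t xs + 1 ≤ r')]
    · rw [if_neg hL] at h h'
      rw [ih (by omega) (by omega)]
      simp only [if_pos (by omega : e.2.length ≤ t)]

lemma trimR_shift (t m : Nat) (xs : List (String × List String)) (h : cntGt t xs ≤ m) :
    trimR t m xs = trimR (t + 1) 0 xs := by
  induction xs with
  | nil => rfl
  | cons e xs ih =>
    rw [cntGt_cons] at h
    simp only [trimR]
    rw [ih (by omega)]
    by_cases hL : e.2.length ≤ t
    · simp only [if_pos hL, if_pos (by omega : e.2.length ≤ t + 1)]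
    · have h1 : cntGt t xs + 1 ≤ m := by rw [if_pos (by omega)] at h; omega
      simp only [if_neg hL]
      by_cases hL1 : e.2.length ≤ t + 1
      · simp only [if_pos h1, if_pos hL1, List.take_of_length_le (by omega : e.2.length ≤ t + 1)]
      · simp only [if_pos h1, if_neg hL1, if_neg (by omega : ¬ cntGt (t+1) xs + 1 ≤ 0)]

lemma take_succ_dropLast (v : List String) (t : Nat) (h : t + 1 ≤ v.length) :
    (v.take (t + 1)).dropLast = v.take t := by
  rw [List.dropLast_eq_take, List.take_take]; congr 1; simp; omega

-- one A-step on a configuration that still holds r+1 lists of length t+1: it pops the first of them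
lemma stepL_trimR_A (t r : Nat) (xs : List (String × List String))
    (h : r + 1 ≤ cntGt t xs) : stepL (t + 1) (trimR t (r + 1) xs) = trimR t r xs := by
  induction xs with
  | nil => simp [cntGt] at h
  | cons e xs ih =>
    rw [cntGt_cons] at h
    by_cases hL : e.2.length ≤ t
    · rw [if_neg (by omega)] at h
      simp only [trimR, if_pos hL, stepL, if_neg (by omega : ¬ e.2.length = t + 1)]
      rw [ih (by omega)]
    · rw [if_pos (by omega)] at h
      by_cases hin : cntGt t xs + 1 ≤ r + 1
      · have hcnt : cntGt t xs = r := by omega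
        simp only [trimR, if_neg hL, if_pos hin, stepL,
          if_pos (by simp [List.length_take]; omega : (e.2.take (t + 1)).length = t + 1)]
        rw [take_succ_dropLast e.2 t (by omega), if_neg (by omega : ¬ cntGt t xs + 1 ≤ r),
          trimR_congr_r t (r + 1) r xs (by omega) (by omega)]
      · simp only [trimR, if_neg hL, if_neg hin, stepL,
          if_neg (by simp [List.length_take]; omega : ¬ (e.2.take t).length = t + 1),
          if_neg (by omega : ¬ cntGt t xs + 1 ≤ r)]
        rw [ih (by omega)]

-- one A-step on the flat configuration capped at t+1: it pops the first list of length ≥ t+1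
lemma stepL_trimR_B (t m : Nat) (xs : List (String × List String))
    (h : cntGt t xs = m + 1) : stepL (t + 1) (trimR (t + 1) 0 xs) = trimR t m xs := by
  induction xs with
  | nil => simp [cntGt] at h
  | cons e xs ih =>
    rw [cntGt_cons] at h
    by_cases hL : t < e.2.length
    · rw [if_pos hL] at h
      have hcnt : cntGt t xs = m := by omega
      have htl : trimR t m xs = trimR (t + 1) 0 xs := trimR_shift t m xs (by omega)
      by_cases hL1 : e.2.length ≤ t + 1
      · have hlen : e.2.length = t + 1 := by omega
        simp only [trimR, if_pos hL1, stepL, if_pos hlen, if_neg (by omega : ¬ e.2.length ≤ t),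
          if_neg (by omega : ¬ cntGt t xs + 1 ≤ m)]
        rw [htl, List.dropLast_eq_take, hlen]
        simp
      · simp only [trimR, if_neg hL1, if_neg (by omega : ¬ cntGt (t + 1) xs + 1 ≤ 0), stepL,
          if_pos (by simp [List.length_take]; omega : (e.2.take (t + 1)).length = t + 1),
          if_neg (by omega : ¬ e.2.length ≤ t), if_neg (by omega : ¬ cntGt t xs + 1 ≤ m)]
        rw [take_succ_dropLast e.2 t (by omega), htl]
    · rw [if_neg hL] at h
      simp only [trimR, if_pos (by omega : e.2.length ≤ t + 1), stepL,
        if_neg (by omega : ¬ e.2.length = t + 1), if_pos (by omega : e.2.length ≤ t)]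
      rw [ih (by omega)]

-- PySem.List.max? through a map
lemma max?_map_fold {α β : Type} (f : α → β) (key : β → Int) :
    ∀ (l : List α) (a : Option α),
      List.foldl (fun acc x => match acc with
        | none => some x
        | some m => if key m < key x then some x else some m) (a.map f) (l.map f)
      = (List.foldl (fun acc x => match acc with
        | none => some x
        | some m => if key (f m) < key (f x) then some x else some m) a l).map f := by
  intro l
  induction l with
  | nil => intro a; rfl
  | cons x l ih =>
    intro a
    cases a with
    | none => simpa using ih (some x)
    | some m =>
      simp only [List.map_cons, List.foldl_cons, Option.map_some]
      by_cases hc : key (f m) < key (f x)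
      · rw [if_pos hc, if_pos hc]; exact ih (some x)
      · rw [if_neg hc, if_neg hc]; exact ih (some m)

lemma max?_map {α β : Type} (f : α → β) (key : β → Int) (l : List α) :
    PySem.List.max? (l.map f) key = (PySem.List.max? l (fun x => key (f x))).map f := by
  simpa [PySem.List.max?] using max?_map_fold f key l none

lemma max?_congr {α : Type} (f g : α → Int) (l : List α) (h : ∀ x ∈ l, f x = g x) :
    PySem.List.max? l f = PySem.List.max? l g := by
  suffices haux : ∀ (l' : List α) (a : Option α), (∀ x ∈ l', f x = g x) →
      (∀ y, a = some y → f y = g y) →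
      List.foldl (fun acc x => match acc with
        | none => some x
        | some m => if f m < f x then some x else some m) a l'
      = List.foldl (fun acc x => match acc with
        | none => some x
        | some m => if g m < g x then some x else some m) a l' by
    exact haux l none h (by simp)
  intro l'
  induction l' with
  | nil => intro a _ _; rfl
  | cons x l' ih =>
    intro a hl ha
    cases a with
    | none =>
      simp only [List.foldl_cons]
      exact ih (some x) (fun y hy => hl y (List.mem_cons_of_mem _ hy))
        (fun y hy => by cases hy; exact hl x (List.mem_cons_self ..))
    | some m =>
      simp only [List.foldl_cons]
      have e1 : f m = g m := ha m rfl
      have e2 : f x = g x := hl x (List.mem_cons_self ..)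
      rw [show (if f m < f x then some x else some m) = (if g m < g x then some x else some m) by
        rw [e1, e2]]
      by_cases hc : g m < g x
      · rw [if_pos hc]
        exact ih (some x) (fun y hy => hl y (List.mem_cons_of_mem _ hy))
          (fun y hy => by cases hy; exact e2)
      · rw [if_neg hc]
        exact ih (some m) (fun y hy => hl y (List.mem_cons_of_mem _ hy))
          (fun y hy => by cases hy; exact e1)

-- max? returns the FIRST maximising element
lemma max?_first {α : Type} (f : α → Int) (l : List α) (m : α)
    (h : PySem.List.max? l f = some m) :
    ∃ p s, l = p ++ m :: s ∧ ∀ y ∈ p, f y < f m := by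
  have haux : ∀ (l' : List α) (m0 m' : α),
      List.foldl (fun acc x => match acc with
        | none => some x
        | some mm => if f mm < f x then some x else some mm) (some m0) l' = some m' →
      (m' = m0 ∧ ∀ y ∈ l', f y ≤ f m0) ∨
      (f m0 < f m' ∧ ∃ p s, l' = p ++ m' :: s ∧ ∀ y ∈ p, f y < f m') := by
    intro l'
    induction l' with
    | nil => intro m0 m' h'; simp at h'; exact Or.inl ⟨h'.symm, by simp⟩
    | cons x l' ih =>
      intro m0 m' h'
      simp only [List.foldl_cons] at h'
      by_cases hc : f m0 < f x
      · rw [if_pos hc] at h'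
        rcases ih x m' h' with ⟨hm, hall⟩ | ⟨hlt, p, s, heq, hall⟩
        · subst hm
          exact Or.inr ⟨hc, [], l', rfl, by simp⟩
        · exact Or.inr ⟨lt_trans hc hlt, x :: p, s, by rw [heq, List.cons_append], by
            intro y hy
            rcases List.mem_cons.mp hy with h | h
            · subst h; exact hlt
            · exact hall y h⟩
      · rw [if_neg hc] at h'
        rcases ih m0 m' h' with ⟨hm, hall⟩ | ⟨hlt, p, s, heq, hall⟩
        · refine Or.inl ⟨hm, ?_⟩
          intro y hy
          rcases List.mem_cons.mp hy with h | h
          · subst h; omega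
          · exact hall y h
        · exact Or.inr ⟨hlt, x :: p, s, by rw [heq, List.cons_append], by
            intro y hy
            rcases List.mem_cons.mp hy with h | h
            · subst h; omega
            · exact hall y h⟩
  cases l with
  | nil => simp [PySem.List.max?] at h
  | cons x l =>
    simp only [PySem.List.max?, List.foldl_cons] at h
    rcases haux l x m h with ⟨hm, _⟩ | ⟨hlt, p, s, heq, hall⟩
    · exact ⟨[], l, by rw [hm]; rfl, by simp⟩
    · exact ⟨x :: p, s, by rw [heq, List.cons_append], by
        intro y hy
        rcases List.mem_cons.mp hy with h' | h'
        · subst h'; exact hlt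
        · exact hall y h'⟩

lemma stepL_append (M : Nat) (p s : List (String × List String)) (e : String × List String)
    (hp : ∀ y ∈ p, y.2.length ≠ M) (he : e.2.length = M) :
    stepL M (p ++ e :: s) = p ++ (e.1, e.2.dropLast) :: s := by
  induction p with
  | nil => simp [stepL, he]
  | cons a p ih =>
    simp only [List.cons_append, stepL, if_neg (hp a (List.mem_cons_self ..))]
    rw [ih (fun y hy => hp y (List.mem_cons_of_mem _ hy))]

lemma map_replace (p s : List (String × List String)) (e : String × List String)
    (v : List String) (hnd : (((p ++ e :: s)).map Prod.fst).Nodup) :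
    (p ++ e :: s).map (fun q => if q.1 == e.1 then (e.1, v) else q) = p ++ (e.1, v) :: s := by
  induction p with
  | nil =>
    simp only [List.nil_append, List.map_cons]
    rw [if_pos (by simp)]
    congr 1
    simp only [List.nil_append, List.map_cons, List.nodup_cons] at hnd
    refine (List.map_congr_left ?_).trans (List.map_id s)
    intro y hy
    have hne : y.1 ≠ e.1 := by
      intro hcontra
      exact hnd.1 (by rw [← hcontra]; exact List.mem_map_of_mem hy)
    simp [beq_false_of_ne hne]
  | cons a p ih =>
    have ha : a.1 ≠ e.1 := by
      simp only [List.cons_append, List.map_cons, List.nodup_cons] at hnd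
      intro hcontra
      exact hnd.1 (by rw [hcontra]; simp)
    simp only [List.cons_append, List.map_cons, beq_false_of_ne ha, Bool.false_eq_true, if_false]
    rw [ih (by simpa using (List.nodup_cons.mp (by simpa using hnd)).2)]

-- A's loop body, characterised: it pops the last query of the first longest list
lemma capA_step_items (C : List (String × List String)) (hnd : (C.map Prod.fst).Nodup)
    (hne : C ≠ []) :
    ∃ e ∈ C, (∀ y ∈ C, y.2.length ≤ e.2.length) ∧
      (capA_step (PySem.Dict.mk C)).items = stepL e.2.length C := by
  have hgetD : ∀ e ∈ C, (PySem.Dict.mk C).getD e.1 [] = e.2 := by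
    intro e he
    exact PySem.Dict.getD_of_mem_items _ (by simpa using he) (by simpa using hnd) []
  have hkeys : (PySem.Dict.mk C).keys = C.map Prod.fst := rfl
  have hmax : PySem.List.max? ((PySem.Dict.mk C).keys)
      (fun qt => PySem.List.len ((PySem.Dict.mk C).getD qt []))
      = (PySem.List.max? C (fun e => PySem.List.len e.2)).map Prod.fst := by
    rw [hkeys, max?_map Prod.fst _ C]
    congr 1
    apply max?_congr
    intro e he
    rw [hgetD e he]
  obtain ⟨m, hm⟩ : ∃ m, PySem.List.max? C (fun e => PySem.List.len e.2) = some m := by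
    cases hC : PySem.List.max? C (fun e => PySem.List.len e.2) with
    | none => exact absurd ((PySem.List.max?_eq_none_iff C _).mp hC) hne
    | some m => exact ⟨m, rfl⟩
  have hmem : m ∈ C := PySem.List.max?_mem hm
  have hbound : ∀ y ∈ C, y.2.length ≤ m.2.length := by
    intro y hy
    have := PySem.List.max?_isMax hm y hy
    simpa [PySem.List.len] using this
  obtain ⟨p, s, heq, hstrict⟩ := max?_first _ C m hm
  refine ⟨m, hmem, hbound, ?_⟩
  have hstep : capA_step (PySem.Dict.mk C)
      = (PySem.Dict.mk C).modify m.1 [] (fun v => v.dropLast) := by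
    unfold capA_step
    rw [hmax, hm, Option.map_some]
  rw [hstep]
  unfold PySem.Dict.modify
  rw [hgetD m hmem]
  rw [PySem.Dict.items_insert_of_contains _ _ (by
    rw [PySem.Dict.contains_iff_mem_keys, hkeys]
    exact List.mem_map_of_mem hmem)]
  have hitems : (PySem.Dict.mk C).items = C := rfl
  rw [hitems, heq, map_replace p s m _ (by rw [← heq]; exact hnd)]
  rw [stepL_append m.2.length p s m ?_ rfl]
  intro y hy
  have := hstrict y hy
  simp only [PySem.List.len] at this
  omega

lemma char_unique (xs : List (String × List String)) (nn a b : Nat)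
    (ha1 : gN a xs ≤ nn) (ha2 : nn < gN (a + 1) xs)
    (hb1 : gN b xs ≤ nn) (hb2 : nn < gN (b + 1) xs) : a = b := by
  by_contra hne
  rcases Nat.lt_or_ge a b with hl | hl
  · have := gN_mono xs (show a + 1 ≤ b by omega)
    omega
  · have hl' : b < a := by omega
    have := gN_mono xs (show b + 1 ≤ a by omega)
    omega

lemma len_le_totN (xs : List (String × List String)) (e : String × List String) (he : e ∈ xs) :
    e.2.length ≤ totN xs := by
  unfold totN
  exact List.le_sum_of_mem (List.mem_map_of_mem he)

lemma exists_long_of_totN_pos (xs : List (String × List String)) (h : 0 < totN xs) :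
    ∃ e ∈ xs, 1 ≤ e.2.length := by
  by_contra hc
  push_neg at hc
  have : totN xs = 0 := by
    unfold totN
    apply List.sum_eq_zero
    intro x hx
    obtain ⟨e, he, rfl⟩ := List.mem_map.mp hx
    have := hc e he
    omega
  omega

lemma char_ex (xs : List (String × List String)) (nn : Nat) (h : nn < totN xs) :
    ∃ t, gN t xs ≤ nn ∧ nn < gN (t + 1) xs := by
  have hP : ∃ t, nn < gN (t + 1) xs := by
    refine ⟨totN xs, ?_⟩
    rw [gN_total _ _ (fun e he => by have := len_le_totN xs e he; omega)]
    exact h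
  classical
  refine ⟨Nat.find hP, ?_, Nat.find_spec hP⟩
  rcases Nat.eq_zero_or_pos (Nat.find hP) with h0 | h0
  · rw [h0, gN_zero]; omega
  · have := Nat.find_min hP (show Nat.find hP - 1 < Nat.find hP by omega)
    have heq : Nat.find hP - 1 + 1 = Nat.find hP := by omega
    rw [heq] at this
    omega

-- one A-step from the untrimmed configuration (the first removal)
lemma step_base (q : List (String × List String)) (hnd : (q.map Prod.fst).Nodup)
    (nn t r : Nat) (htot : nn + 1 = totN q)
    (h1 : gN t q ≤ nn) (h2 : nn < gN (t + 1) q) (hr : r = nn - gN t q) :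
    (capA_step (PySem.Dict.mk q)).items = trimR t r q := by
  have hqne : q ≠ [] := by
    intro hq; subst hq; simp [totN] at htot
  obtain ⟨m, hmem, hbound, heq⟩ := capA_step_items q hnd hqne
  have hMx1 : 1 ≤ m.2.length := by
    obtain ⟨e, he, hl⟩ := exists_long_of_totN_pos q (by omega)
    have := hbound e he
    omega
  have hcnt1 : 1 ≤ cntGt (m.2.length - 1) q := by
    unfold cntGt
    have hpos := (List.countP_pos_iff
      (p := fun (e : String × List String) => decide (m.2.length - 1 < e.2.length))
      (l := q)).mpr ⟨m, hmem, by simp; omega⟩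
    omega
  have hgMx : gN m.2.length q = totN q := gN_total _ _ hbound
  have hgsucc : gN (m.2.length - 1 + 1) q = gN (m.2.length - 1) q + cntGt (m.2.length - 1) q :=
    gN_succ _ q
  rw [show m.2.length - 1 + 1 = m.2.length by omega] at hgsucc
  -- identify (t, r)
  have ht : t = m.2.length - 1 := by
    refine char_unique q nn t (m.2.length - 1) h1 h2 (by omega) ?_
    rw [show m.2.length - 1 + 1 = m.2.length by omega, hgMx]
    omega
  rw [heq]
  have hB := stepL_trimR_B (m.2.length - 1) (cntGt (m.2.length - 1) q - 1) q (by omega)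
  rw [show m.2.length - 1 + 1 = m.2.length by omega] at hB
  rw [trimR_id m.2.length q (fun e he => hbound e he)] at hB
  subst ht
  rw [hB, hr]
  congr 1
  omega

-- one A-step from a trimmed configuration
lemma step_main (q : List (String × List String)) (hnd : (q.map Prod.fst).Nodup)
    (nn t' r' t r : Nat)
    (h1' : gN t' q ≤ nn + 1) (h2' : nn + 1 < gN (t' + 1) q) (hr' : r' = nn + 1 - gN t' q)
    (h1 : gN t q ≤ nn) (h2 : nn < gN (t + 1) q) (hr : r = nn - gN t q) :
    (capA_step (PySem.Dict.mk (trimR t' r' q))).items = trimR t r q := by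
  have hqne : q ≠ [] := by
    intro hq; subst hq; simp [gN] at h2'
  have hndC : ((trimR t' r' q).map Prod.fst).Nodup := by rw [map_fst_trimR]; exact hnd
  have hCne : trimR t' r' q ≠ [] := by
    intro hC
    have := map_fst_trimR t' r' q
    rw [hC] at this
    exact hqne (by cases q <;> simp_all)
  obtain ⟨m, hmem, hbound, heq⟩ := capA_step_items (trimR t' r' q) hndC hCne
  have hgsucc' : gN (t' + 1) q = gN t' q + cntGt t' q := gN_succ _ q
  rcases Nat.eq_zero_or_pos r' with hr0 | hr0
  · -- r' = 0 : the configuration is flat at t'; A pops the first list of length t'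
    subst hr0
    have hgt' : gN t' q = nn + 1 := by omega
    have ht'1 : 1 ≤ t' := by
      rcases Nat.eq_zero_or_pos t' with h0 | h0
      · rw [h0, gN_zero] at hgt'; omega
      · omega
    have hcnt' : 1 ≤ cntGt t' q := by omega
    have hcnt'' : cntGt t' q ≤ cntGt (t' - 1) q := cntGt_anti _ _ (by omega) q
    have hlenm : m.2.length = t' := by
      have hle := trimR_len_le0 t' q m hmem
      obtain ⟨e, he, hl⟩ := trimR_exB t' q (by
        obtain ⟨y, hy, hyl⟩ := List.countP_pos_iff.mp
          (show 0 < q.countP (fun e => decide (t' < e.2.length)) by unfold cntGt at hcnt'; omega)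
        exact ⟨y, hy, by simp at hyl; omega⟩)
      have := hbound e he
      omega
    have hB := stepL_trimR_B (t' - 1) (cntGt (t' - 1) q - 1) q (by omega)
    rw [show t' - 1 + 1 = t' by omega] at hB
    rw [heq, hlenm, hB]
    have hgsucc'' : gN t' q = gN (t' - 1) q + cntGt (t' - 1) q := by
      have := gN_succ (t' - 1) q
      rw [show t' - 1 + 1 = t' by omega] at this
      exact this
    have ht : t = t' - 1 := by
      refine char_unique q nn t (t' - 1) h1 h2 (by omega) ?_
      rw [show t' - 1 + 1 = t' by omega]
      omega
    subst ht
    rw [hr]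
    congr 1
    omega
  · -- r' ≥ 1 : the configuration still holds r' lists of length t'+1; A pops the first
    have hgt' : gN t' q = nn + 1 - r' := by omega
    have hcge : r' ≤ cntGt t' q := by omega
    have hlenm : m.2.length = t' + 1 := by
      have hle := trimR_len_le t' r' q m hmem
      obtain ⟨e, he, hl⟩ := trimR_exA t' r' q hr0 hcge
      have := hbound e he
      omega
    have hA := stepL_trimR_A t' (r' - 1) q (by omega)
    rw [show r' - 1 + 1 = r' by omega] at hA
    rw [heq, hlenm, hA]
    have ht : t = t' := by
      refine char_unique q nn t t' h1 h2 (by omega) (by omega)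
    subst ht
    rw [hr]
    congr 1
    omega

lemma foldl_const_iter {α β : Type} (f : α → α) (l : List β) (a : α) :
    l.foldl (fun x _ => f x) a = f^[l.length] a := by
  induction l generalizing a with
  | nil => rfl
  | cons x l ih => simp only [List.foldl_cons, List.length_cons, ih, Function.iterate_succ_apply]

-- A's whole removal loop lands on the trimmed configuration
lemma iter_main (q : List (String × List String)) (hnd : (q.map Prod.fst).Nodup) :
    ∀ k, 1 ≤ k → k ≤ totN q → ∀ t r, gN t q ≤ totN q - k → totN q - k < gN (t + 1) q →
      r = (totN q - k) - gN t q →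
      ((capA_step)^[k] (PySem.Dict.mk q)).items = trimR t r q := by
  intro k
  induction k with
  | zero => omega
  | succ k ih =>
    intro _ hk t r h1 h2 hr
    rcases Nat.eq_zero_or_pos k with hk0 | hk0
    · subst hk0
      rw [Function.iterate_one]
      exact step_base q hnd (totN q - 1) t r (by omega)
        (by rw [show totN q - 1 = totN q - (0+1) by omega] at h1 ⊢; exact h1)
        (by rw [show totN q - 1 = totN q - (0+1) by omega] at h2 ⊢; exact h2) (by omega)
    · obtain ⟨t', ht'1, ht'2⟩ := char_ex q (totN q - k) (by omega)
      have hIH := ih hk0 (by omega) t' ((totN q - k) - gN t' q) ht'1 ht'2 rfl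
      rw [Function.iterate_succ_apply']
      have hDict : (capA_step)^[k] (PySem.Dict.mk q)
          = PySem.Dict.mk (trimR t' ((totN q - k) - gN t' q) q) := by
        apply PySem.Dict.ext
        exact hIH
      rw [hDict]
      have hsub : totN q - k = (totN q - (k + 1)) + 1 := by omega
      exact step_main q hnd (totN q - (k + 1)) t' ((totN q - k) - gN t' q) t r
        (by omega) (by omega) (by omega) h1 h2 hr

-- B-side: casts between the port's Int arithmetic and the Nat spec functions
lemma lens_eq (q : List (String × List String)) :
    (PySem.Dict.mk q).values.map PySem.List.len = q.map (fun e => (e.2.length : Int)) := by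
  simp [PySem.Dict.values, PySem.List.len, Function.comp]

lemma tot_eq (q : List (String × List String)) :
    ((q.map (fun e => (e.2.length : Int)))).sum = (totN q : Int) := by
  induction q with
  | nil => simp [totN]
  | cons e xs ih =>
    simp only [List.map_cons, List.sum_cons, ih]
    unfold totN
    push_cast
    simp

lemma gI_eq (q : List (String × List String)) (t : Int) (ht : 0 ≤ t) :
    ((q.map (fun e => (e.2.length : Int))).map (fun l => min l t)).sum = (gN t.toNat q : Int) := by
  induction q with
  | nil => simp [gN]
  | cons e xs ih =>
    simp only [List.map_cons, List.sum_cons, ih, gN_cons]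
    push_cast
    omega

lemma cnt_eq (q : List (String × List String)) (t : Int) (ht : 0 ≤ t) :
    ((q.map (fun e => (e.2.length : Int))).map (fun l => if t < l then (1 : Int) else 0)).sum
      = (cntGt t.toNat q : Int) := by
  induction q with
  | nil => simp [cntGt]
  | cons e xs ih =>
    simp only [List.map_cons, List.sum_cons, ih, cntGt_cons]
    push_cast
    split_ifs <;> omega

lemma sum_min_mono (lens : List Int) (a b : Int) (h : a ≤ b) :
    (lens.map (fun l => min l a)).sum ≤ (lens.map (fun l => min l b)).sum :=
  List.sum_le_sum (fun x _ => min_le_min (le_refl x) h)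

lemma max_facts (q : List (String × List String)) (hne : q ≠ []) :
    ∃ mx : Int, PySem.List.max? (q.map (fun e => (e.2.length : Int))) (fun x => x) = some mx ∧
      0 ≤ mx ∧ (∀ e ∈ q, (e.2.length : Int) ≤ mx) ∧
      ((q.map (fun e => (e.2.length : Int))).map (fun l => min l mx)).sum
        = (q.map (fun e => (e.2.length : Int))).sum := by
  obtain ⟨mx, hmx⟩ : ∃ mx, PySem.List.max? (q.map (fun e => (e.2.length : Int))) (fun x => x)
      = some mx := by
    cases hC : PySem.List.max? (q.map (fun e => (e.2.length : Int))) (fun x => x) with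
    | none =>
      have := (PySem.List.max?_eq_none_iff _ _).mp hC
      exact absurd (by simpa using this) hne
    | some m => exact ⟨m, rfl⟩
  have hmem : mx ∈ q.map (fun e => (e.2.length : Int)) := PySem.List.max?_mem hmx
  have h0 : 0 ≤ mx := by
    obtain ⟨e, _, rfl⟩ := List.mem_map.mp hmem
    positivity
  have hbd : ∀ e ∈ q, (e.2.length : Int) ≤ mx := by
    intro e he
    exact PySem.List.max?_isMax hmx _ (List.mem_map_of_mem he)
  refine ⟨mx, hmx, h0, hbd, ?_⟩
  congr 1
  rw [List.map_map]
  apply List.map_congr_left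
  intro e he
  simp only [Function.comp_apply]
  exact min_eq_left (hbd e he)

-- the binary search returns the unique threshold t with g t ≤ n < g (t+1)
lemma search_spec (g : Int → Int) (mono : ∀ a b : Int, a ≤ b → g a ≤ g b) (n : Int) :
    ∀ (fuel : Nat) (lo hi : Int), lo < hi → (hi - lo).toNat ≤ fuel → g lo ≤ n → n < g hi →
      lo ≤ capAltSearch g n fuel lo hi ∧ capAltSearch g n fuel lo hi < hi ∧
        g (capAltSearch g n fuel lo hi) ≤ n ∧ n < g (capAltSearch g n fuel lo hi + 1) := by
  intro fuel
  induction fuel with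
  | zero => intro lo hi hlt hf _ _; omega
  | succ fuel ih =>
    intro lo hi hlt hf hg1 hg2
    simp only [capAltSearch]
    by_cases h : 1 < hi - lo
    · rw [if_pos h]
      have hmid1 : lo + 1 ≤ PySem.Int.floordiv (lo + hi) 2 :=
        (PySem.Int.le_floordiv_iff_mul_le (by omega)).mpr (by omega)
      have hmid2 : PySem.Int.floordiv (lo + hi) 2 < hi :=
        (PySem.Int.floordiv_lt_iff_lt_mul (by omega)).mpr (by omega)
      by_cases hgm : g (PySem.Int.floordiv (lo + hi) 2) ≤ n
      · rw [if_pos hgm]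
        obtain ⟨a, b, c, d⟩ := ih (PySem.Int.floordiv (lo + hi) 2) hi (by omega) (by omega) hgm hg2
        exact ⟨by omega, b, c, d⟩
      · rw [if_neg hgm]
        obtain ⟨a, b, c, d⟩ := ih lo (PySem.Int.floordiv (lo + hi) 2) (by omega) (by omega) hg1
          (by omega)
        exact ⟨a, by omega, c, d⟩
    · rw [if_neg h]
      refine ⟨le_refl lo, hlt, hg1, ?_⟩
      have : g hi ≤ g (lo + 1) := mono _ _ (by omega)
      omega

-- B's output loop builds exactly the trimmed configuration
lemma scan_spec (tN rN : Nat) (tI r c : Int)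
    (hti : tI = (tN : Int)) (hri : r = (rN : Int)) :
    ∀ (xs : List (String × List String)) (dAcc : PySem.Dict String (List String)) (seen : Int),
      (∀ e ∈ xs, dAcc.contains e.1 = false) → (xs.map Prod.fst).Nodup →
      c - seen = (cntGt tN xs : Int) →
      (xs.foldl
        (fun (acc : PySem.Dict String (List String) × Int) kv =>
          if tI < PySem.List.len kv.2 then
            (acc.1.insert kv.1
              (PySem.List.slice kv.2 none (some (if c - r < acc.2 + 1 then tI + 1 else tI))),
              acc.2 + 1)
          else (acc.1.insert kv.1 kv.2, acc.2))
        (dAcc, seen)).1.items = dAcc.items ++ trimR tN rN xs := by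
  intro xs
  induction xs with
  | nil => intro dAcc seen _ _ _; simp [trimR]
  | cons e xs ih =>
    intro dAcc seen hcont hnd hinv
    rw [cntGt_cons] at hinv
    simp only [List.foldl_cons]
    have hce : dAcc.contains e.1 = false := hcont e (List.mem_cons_self ..)
    have hcont' : ∀ y ∈ xs, ∀ (v : List String), (dAcc.insert e.1 v).contains y.1 = false := by
      intro y hy v
      rw [PySem.Dict.contains_insert]
      have hyne : y.1 ≠ e.1 := by
        simp only [List.map_cons, List.nodup_cons] at hnd
        intro hc
        exact hnd.1 (by rw [← hc]; exact List.mem_map_of_mem hy)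
      simp [beq_false_of_ne hyne, hcont y (List.mem_cons_of_mem _ hy)]
    have hnd' : (xs.map Prod.fst).Nodup := by
      simp only [List.map_cons, List.nodup_cons] at hnd
      exact hnd.2
    by_cases hc : tN < e.2.length
    · rw [if_pos (by simp [PySem.List.len, hti]; omega : tI < PySem.List.len e.2)]
      have hinv' : c - (seen + 1) = (cntGt tN xs : Int) := by
        rw [if_pos hc] at hinv
        omega
      rw [ih _ (seen + 1) (fun y hy => hcont' y hy _) hnd' hinv']
      rw [PySem.Dict.items_insert_of_not_contains _ _ hce]
      rw [List.append_assoc]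
      congr 1
      simp only [trimR, if_neg (by omega : ¬ e.2.length ≤ tN), List.singleton_append]
      by_cases hin : cntGt tN xs + 1 ≤ rN
      · rw [if_pos (by rw [if_pos hc] at hinv; omega : c - r < seen + 1), if_pos hin]
        congr 2
        rw [PySem.List.slice_to _ (by omega), hti]
        congr 1
      · rw [if_neg (by rw [if_pos hc] at hinv; omega : ¬ c - r < seen + 1), if_neg hin]
        congr 2
        rw [PySem.List.slice_to _ (by omega), hti]
        congr 1
    · rw [if_neg (by simp [PySem.List.len, hti]; omega : ¬ tI < PySem.List.len e.2)]
      have hinv' : c - seen = (cntGt tN xs : Int) := by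
        rw [if_neg hc] at hinv
        omega
      rw [ih _ seen (fun y hy => hcont' y hy _) hnd' hinv']
      rw [PySem.Dict.items_insert_of_not_contains _ _ hce]
      rw [List.append_assoc]
      congr 1
      simp only [trimR, if_pos (by omega : e.2.length ≤ tN), List.singleton_append]

-- ===== VERDICT (by name: the statement is the Claim_ definition above) =====
theorem cap_query_type_to_rewritten_queries_spec : Claim_equal_cap_query_type_to_rewritten_queries := by
  unfold Claim_equal_cap_query_type_to_rewritten_queries
  intro q n hdom hpre
  unfold Spec_cap_query_type_to_rewritten_queries
  obtain ⟨hn0, hnd⟩ := hpre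
  unfold cap_query_type_to_rewritten_queries cap_query_type_to_rewritten_queries_alt
  simp only [lens_eq, tot_eq]
  by_cases hle : ((totN q : Int)) ≤ n
  · rw [if_pos hle, if_pos hle]
  · rw [if_neg hle, if_neg hle]
    have hlt : n.toNat < totN q := by omega
    have hqne : q ≠ [] := by
      intro h
      subst h
      simp [totN] at hlt
    obtain ⟨mx, hmx, hmx0, hmxbd, hmxsum⟩ := max_facts q hqne
    simp only [hmx]
    have hmx1 : 0 < mx := by
      obtain ⟨e, he, hl⟩ := exists_long_of_totN_pos q (by omega)
      have := hmxbd e he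
      omega
    have hsearch := search_spec
      (fun t => ((q.map (fun e => (e.2.length : Int))).map (fun l => min l t)).sum)
      (fun a b h => sum_min_mono _ a b h) n (mx - 0).toNat 0 mx hmx1 (le_refl _)
      (by beta_reduce; rw [gI_eq q 0 (le_refl 0)]; simpa [gN_zero] using hn0)
      (by beta_reduce; rw [hmxsum, tot_eq]; omega)
    set tI := capAltSearch
      (fun t => ((q.map (fun e => (e.2.length : Int))).map (fun l => min l t)).sum)
      n (mx - 0).toNat 0 mx with htIdef
    obtain ⟨ht0, htmx, htg1, htg2⟩ := hsearch
    beta_reduce at htg1 htg2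
    set tN := tI.toNat with htNdef
    have htI : tI = (tN : Int) := (Int.toNat_of_nonneg ht0).symm
    rw [htI] at htg1 htg2
    rw [gI_eq q (tN : Int) (by exact_mod_cast Nat.zero_le tN)] at htg1
    rw [gI_eq q ((tN : Int) + 1) (by positivity)] at htg2
    simp only [Int.toNat_natCast] at htg1
    rw [show ((tN : Int) + 1).toNat = tN + 1 by omega] at htg2
    have hchar1 : gN tN q ≤ n.toNat := by omega
    have hchar2 : n.toNat < gN (tN + 1) q := by omega
    set rN := n.toNat - gN tN q with hrNdef
    have hr_eq : n - ((q.map (fun e => (e.2.length : Int))).map (fun l => min l tI)).sum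
        = (rN : Int) := by
      rw [htI, gI_eq q (tN : Int) (by exact_mod_cast Nat.zero_le tN), Int.toNat_natCast]
      omega
    have hc_eq : ((q.map (fun e => (e.2.length : Int))).map
        (fun l => if tI < l then (1 : Int) else 0)).sum = (cntGt tN q : Int) := by
      rw [htI, cnt_eq q ((tN : Int)) (by exact_mod_cast Nat.zero_le tN)]
      norm_num
    rw [foldl_const_iter, PySem.List.length_pyRange_one]
    rw [show ((totN q : Int) - n - 0).toNat = totN q - n.toNat by omega]
    have hA := iter_main q hnd (totN q - n.toNat) (by omega) (by omega) tN rN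
      (by rw [show totN q - (totN q - n.toNat) = n.toNat by omega]; exact hchar1)
      (by rw [show totN q - (totN q - n.toNat) = n.toNat by omega]; exact hchar2)
      (by rw [show totN q - (totN q - n.toNat) = n.toNat by omega])
    rw [hA]
    rw [scan_spec tN rN tI _ _ htI hr_eq q (PySem.Dict.mk []) 0
      (fun e _ => rfl) hnd (by rw [sub_zero]; exact hc_eq)]
    rfl
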